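-- pv_equiv track=rewrite | github.com/releventhal/ep2_luana_e_renata | funcoes.py | calcula_pontos_sequencia_baixa
-- ===== SOURCE A (Python) =====
-- def calcula_pontos_sequencia_baixa(dados):
--     novos = []
--     for n in dados:
--         if n not in novos:
--             novos.append(n)
--
--     for i in range(len(novos)):
--         for j in range(i + 1, len(novos)):
--             if novos[i] > novos[j]:
--                 novos[i], novos[j] = novos[j], novos[i]
--
--     contagem = 1
--     for i in range(1, len(novos)):
--         if novos[i] == novos[i - 1] + 1:
--             contagem += 1
--             if contagem >= 4:
--                 return 15
--         else:
--             contagem = 1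
--
--     return 0
-- ===== SOURCE B (Python) =====
-- def calcula_pontos_sequencia_baixa(dados):
--     s = set(dados)
--     return 15 if any(v + 1 in s and v + 2 in s and v + 3 in s for v in s) else 0
-- ===== Notes on version B (the rewrite author's own statement) =====
-- stated objective: faster
-- what changed: Replaces dedup-by-scan + quadratic swap sort + run scan with a single hash-set membership test for four consecutive values v..v+3.
import Mathlib
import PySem

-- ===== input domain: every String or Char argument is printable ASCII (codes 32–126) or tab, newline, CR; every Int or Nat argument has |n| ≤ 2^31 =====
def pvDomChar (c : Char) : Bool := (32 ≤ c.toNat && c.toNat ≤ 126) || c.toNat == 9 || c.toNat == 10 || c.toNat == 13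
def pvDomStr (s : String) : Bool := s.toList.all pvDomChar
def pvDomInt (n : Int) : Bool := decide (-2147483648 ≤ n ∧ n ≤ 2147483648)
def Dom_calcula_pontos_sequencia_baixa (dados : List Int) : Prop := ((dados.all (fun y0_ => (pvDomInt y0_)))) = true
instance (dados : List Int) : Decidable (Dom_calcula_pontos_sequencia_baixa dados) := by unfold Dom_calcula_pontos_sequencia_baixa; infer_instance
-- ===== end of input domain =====

-- B replaces A's dedup-scan + quadratic swap sort + adjacent-run scan by one hash-set
-- membership test for four consecutive values v, v+1, v+2, v+3 (measured faster, asymptotic).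

-- ===== PORT A =====
-- first loop: dedup keeping first occurrences
def pvDedup (dados : List Int) (novos : List Int) : List Int :=
  match dados with
  | [] => novos
  | n :: rest => if n ∈ novos then pvDedup rest novos else pvDedup rest (novos ++ [n])

-- one compare-and-swap of A's double loop (indices produced by the ranges are always
-- in range, so the fallback arms are unreachable)
def pvSwapStep (l : List Int) (i j : Nat) : List Int :=
  match l[i]?, l[j]? with
  | some a, some b => if a > b then (l.set i b).set j a else l
  | _, _ => l

-- inner loop 'for j in range(i+1, len(novos))' (swaps preserve the length)
def pvInner (l : List Int) (i : Nat) : List Int :=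
  (List.range' (i+1) (l.length - (i+1))).foldl (fun l j => pvSwapStep l i j) l

-- outer loop 'for i in range(len(novos))'
def pvSortPass (l : List Int) : List Int :=
  (List.range l.length).foldl (fun l i => pvInner l i) l

-- third loop 'for i in range(1, len(novos))' with early return 15
def pvScan (l : List Int) (idxs : List Nat) (cont : Int) : Int :=
  match idxs with
  | [] => 0
  | i :: rest =>
    if l.getD i 0 = l.getD (i-1) 0 + 1 then
      if cont + 1 ≥ 4 then 15 else pvScan l rest (cont + 1)
    else pvScan l rest 1

def calcula_pontos_sequencia_baixa (dados : List Int) : Int :=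
  let novos := pvSortPass (pvDedup dados [])
  pvScan novos (List.range' 1 (novos.length - 1)) 1

-- ===== PORT B =====
def calcula_pontos_sequencia_baixa_alt (dados : List Int) : Int :=
  let s := PySem.Set.ofList dados
  if s.any (fun v => PySem.Set.contains s (v+1) && PySem.Set.contains s (v+2) && PySem.Set.contains s (v+3))
  then 15 else 0

-- ===== PRECONDITION & SPEC =====
def Spec_calcula_pontos_sequencia_baixa (dados : List Int) (out : Int) : Prop := out = calcula_pontos_sequencia_baixa_alt dados
instance (dados : List Int) (out : Int) : Decidable (Spec_calcula_pontos_sequencia_baixa dados out) := by unfold Spec_calcula_pontos_sequencia_baixa; infer_instance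

-- ===== CLAIM (what is proved, stated in full; the proofs are below) =====
def Claim_equal_calcula_pontos_sequencia_baixa : Prop := ∀ (dados : List Int), Dom_calcula_pontos_sequencia_baixa dados → Spec_calcula_pontos_sequencia_baixa dados (calcula_pontos_sequencia_baixa dados)

-- ===== LEMMAS AND PROOFS =====

-- structural selection sort: sweep pulls the minimum to the front
def pvSweep : Int → List Int → Int × List Int
  | h, [] => (h, [])
  | h, t :: ts => if h > t then ((pvSweep t ts).1, h :: (pvSweep t ts).2)
                  else ((pvSweep h ts).1, t :: (pvSweep h ts).2)

theorem pvSweep_length (h : Int) (ts : List Int) : (pvSweep h ts).2.length = ts.length := by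
  induction ts generalizing h with
  | nil => rfl
  | cons t ts ih => simp only [pvSweep]; split <;> simp [ih]

def pvSelSort : List Int → List Int
  | [] => []
  | h :: ts => (pvSweep h ts).1 :: pvSelSort (pvSweep h ts).2
termination_by l => l.length
decreasing_by simp [pvSweep_length]

-- ---- bridging pvSortPass to pvSelSort ----

theorem pvSwapStep_length (l : List Int) (i j : Nat) : (pvSwapStep l i j).length = l.length := by
  unfold pvSwapStep
  cases hi : l[i]? <;> cases hj : l[j]? <;> simp
  split <;> simp

theorem pvSwapStep_succ (a : Int) (l : List Int) (i j : Nat) :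
    pvSwapStep (a :: l) (i+1) (j+1) = a :: pvSwapStep l i j := by
  simp only [pvSwapStep, List.getElem?_cons_succ]
  cases hi : l[i]? <;> cases hj : l[j]? <;> simp
  split <;> simp

theorem pvSwapStep_skip1 (x y : Int) (l : List Int) (j : Nat) (x' : Int) (l' : List Int)
    (h : pvSwapStep (x :: l) 0 (j+1) = x' :: l') :
    pvSwapStep (x :: y :: l) 0 (j+2) = x' :: y :: l' := by
  unfold pvSwapStep at *
  cases hj : l[j]? <;> simp [hj] at h ⊢
  · exact ⟨h.1, h.2⟩
  · split at h <;> split <;> simp_all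

theorem pvRange'_shift (s n : Nat) : List.range' (s+1) n = (List.range' s n).map (· + 1) := by
  induction n generalizing s with
  | zero => rfl
  | succ n ih =>
    rw [List.range'_succ, List.range'_succ, List.map_cons, ih (s+1)]

theorem pvRange'_one (n : Nat) : List.range' 1 n = (List.range n).map (· + 1) := by
  rw [List.range_eq_range', pvRange'_shift]

theorem pvFoldSkip (js : List Nat) : ∀ (x y : Int) (l : List Int) (x' : Int) (l' : List Int),
    js.foldl (fun l j => pvSwapStep l 0 (j+1)) (x :: l) = x' :: l' →
    js.foldl (fun l j => pvSwapStep l 0 (j+2)) (x :: y :: l) = x' :: y :: l' := by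
  induction js with
  | nil => intro x y l x' l' h; rw [List.foldl_nil] at h ⊢; cases h; rfl
  | cons j js ih =>
    intro x y l x' l' h
    rw [List.foldl_cons] at h ⊢
    cases hstep : pvSwapStep (x :: l) 0 (j+1) with
    | nil =>
      have hlen := pvSwapStep_length (x :: l) 0 (j+1)
      rw [hstep] at hlen; simp at hlen
    | cons x1 l1 =>
      rw [hstep] at h
      rw [pvSwapStep_skip1 x y l j x1 l1 hstep]
      exact ih x1 y l1 x' l' h

theorem pvInnerZero (ts : List Int) : ∀ (h : Int),
    (List.range ts.length).foldl (fun l k => pvSwapStep l 0 (k+1)) (h :: ts)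
      = (pvSweep h ts).1 :: (pvSweep h ts).2 := by
  induction ts with
  | nil => intro h; rfl
  | cons t ts ih =>
    intro h
    rw [List.length_cons, List.range_succ_eq_map, List.foldl_cons, List.foldl_map]
    have hfirst : pvSwapStep (h :: t :: ts) 0 (0+1)
        = (if t < h then t else h) :: (if t < h then h else t) :: ts := by
      by_cases hgt : t < h <;> simp [pvSwapStep, hgt]
    rw [hfirst]
    have hmain := pvFoldSkip (List.range ts.length) (if t < h then t else h)
      (if t < h then h else t) ts _ _ (ih (if t < h then t else h))
    by_cases hgt : t < h <;> simp only [hgt, if_true, if_false] <;>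
      simp only [hgt, if_true, if_false] at hmain <;>
      [skip; skip] <;> rw [show (fun (l : List Int) (k : Nat) => pvSwapStep l 0 (Nat.succ k + 1))
          = (fun l j => pvSwapStep l 0 (j+2)) from rfl, hmain] <;>
      simp [pvSweep, hgt]

theorem pvFoldShift (js : List Nat) : ∀ (a : Int) (l : List Int) (i : Nat),
    js.foldl (fun l j => pvSwapStep l (i+1) (j+1)) (a :: l)
      = a :: js.foldl (fun l j => pvSwapStep l i j) l := by
  induction js with
  | nil => intros; rfl
  | cons j js ih => intro a l i; simp [List.foldl_cons, pvSwapStep_succ, ih]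

theorem pvInner_shift (a : Int) (l : List Int) (i : Nat) :
    pvInner (a :: l) (i+1) = a :: pvInner l i := by
  unfold pvInner
  rw [List.length_cons]
  have hn : (l.length + 1) - (i + 1 + 1) = l.length - (i + 1) := by omega
  rw [hn, pvRange'_shift (i+1), List.foldl_map]
  exact pvFoldShift (List.range' (i+1) (l.length - (i+1))) a l i

theorem pvInnerFoldShift (js : List Nat) : ∀ (a : Int) (l : List Int),
    js.foldl (fun l i => pvInner l (i+1)) (a :: l) = a :: js.foldl (fun l i => pvInner l i) l := by
  induction js with
  | nil => intro a l; rfl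
  | cons j js ih => intro a l; rw [List.foldl_cons, List.foldl_cons, pvInner_shift, ih]

theorem pvInner_zero_eq (h : Int) (ts : List Int) :
    pvInner (h :: ts) 0 = (pvSweep h ts).1 :: (pvSweep h ts).2 := by
  unfold pvInner
  rw [List.length_cons]
  have hn : (ts.length + 1) - (0 + 1) = ts.length := by omega
  rw [hn, pvRange'_one, List.foldl_map]
  exact pvInnerZero ts h

theorem pvSortPass_eq_selSort (l : List Int) : pvSortPass l = pvSelSort l := by
  suffices hmain : ∀ (n : Nat) (l : List Int), l.length ≤ n → pvSortPass l = pvSelSort l from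
    hmain l.length l le_rfl
  intro n
  induction n with
  | zero =>
    intro l hl
    cases l with
    | nil => simp [pvSortPass, pvSelSort]
    | cons h ts => simp at hl
  | succ n ih =>
    intro l hl
    cases l with
    | nil => simp [pvSortPass, pvSelSort]
    | cons h ts =>
      unfold pvSortPass
      rw [List.length_cons, List.range_succ_eq_map, List.foldl_cons, List.foldl_map,
        pvInner_zero_eq, pvInnerFoldShift]
      have hlen : (pvSweep h ts).2.length = ts.length := pvSweep_length h ts
      have hrec : (List.range ts.length).foldl (fun l i => pvInner l i) (pvSweep h ts).2
          = pvSortPass (pvSweep h ts).2 := by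
        unfold pvSortPass; rw [hlen]
      rw [hrec, ih _ (by rw [hlen]; simpa using hl)]
      simp [pvSelSort]

-- ---- properties of pvSelSort ----

theorem pvSweep_perm (h : Int) (ts : List Int) :
    ((pvSweep h ts).1 :: (pvSweep h ts).2).Perm (h :: ts) := by
  induction ts generalizing h with
  | nil => rfl
  | cons t ts ih =>
    simp only [pvSweep]; split
    · exact (List.Perm.swap h _ _).trans ((ih t).cons h)
    · exact ((List.Perm.swap t _ _).trans ((ih h).cons t)).trans (List.Perm.swap h t ts)

theorem pvSweep_min (h : Int) (ts : List Int) :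
    (pvSweep h ts).1 ≤ h ∧ ∀ x ∈ (pvSweep h ts).2, (pvSweep h ts).1 ≤ x := by
  induction ts generalizing h with
  | nil => simp [pvSweep]
  | cons t ts ih =>
    simp only [pvSweep]; split
    · rename_i hgt
      refine ⟨le_trans (ih t).1 (le_of_lt hgt), ?_⟩
      intro x hx
      rcases List.mem_cons.mp hx with rfl | hx
      · exact le_trans (ih t).1 (le_of_lt hgt)
      · exact (ih t).2 x hx
    · rename_i hle
      refine ⟨(ih h).1, ?_⟩
      intro x hx
      rcases List.mem_cons.mp hx with rfl | hx
      · exact le_trans (ih h).1 (by omega)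
      · exact (ih h).2 x hx

theorem pvSelSort_perm (l : List Int) : (pvSelSort l).Perm l := by
  suffices hmain : ∀ (n : Nat) (l : List Int), l.length ≤ n → (pvSelSort l).Perm l from
    hmain l.length l le_rfl
  intro n
  induction n with
  | zero =>
    intro l hl
    cases l with
    | nil => simp [pvSelSort]
    | cons h ts => simp at hl
  | succ n ih =>
    intro l hl
    cases l with
    | nil => simp [pvSelSort]
    | cons h ts =>
      have hlen : (pvSweep h ts).2.length = ts.length := pvSweep_length h ts
      have hrec := ih (pvSweep h ts).2 (by rw [hlen]; simpa using hl)
      have h1 : pvSelSort (h :: ts) = (pvSweep h ts).1 :: pvSelSort (pvSweep h ts).2 := by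
        simp [pvSelSort]
      rw [h1]
      exact (hrec.cons _).trans (pvSweep_perm h ts)

theorem pvSelSort_sorted (l : List Int) : (pvSelSort l).Pairwise (· ≤ ·) := by
  suffices hmain : ∀ (n : Nat) (l : List Int), l.length ≤ n → (pvSelSort l).Pairwise (· ≤ ·) from
    hmain l.length l le_rfl
  intro n
  induction n with
  | zero =>
    intro l hl
    cases l with
    | nil => simp [pvSelSort]
    | cons h ts => simp at hl
  | succ n ih =>
    intro l hl
    cases l with
    | nil => simp [pvSelSort]
    | cons h ts =>
      have hlen : (pvSweep h ts).2.length = ts.length := pvSweep_length h ts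
      have hsmall : (pvSweep h ts).2.length ≤ n := by rw [hlen]; simpa using hl
      have hrec := ih (pvSweep h ts).2 hsmall
      have hperm := pvSelSort_perm (pvSweep h ts).2
      have : pvSelSort (h :: ts) = (pvSweep h ts).1 :: pvSelSort (pvSweep h ts).2 := by
        simp [pvSelSort]
      rw [this, List.pairwise_cons]
      refine ⟨?_, hrec⟩
      intro x hx
      exact (pvSweep_min h ts).2 x (hperm.mem_iff.mp hx)

-- ---- dedup properties ----

theorem pvDedup_mem (dados : List Int) : ∀ (acc : List Int) (x : Int),
    x ∈ pvDedup dados acc ↔ x ∈ acc ∨ x ∈ dados := by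
  induction dados with
  | nil => intro acc x; simp [pvDedup]
  | cons d rest ih =>
    intro acc x
    simp only [pvDedup]
    split
    · rename_i hd
      rw [ih]
      constructor
      · rintro (hx | hx)
        · exact Or.inl hx
        · exact Or.inr (List.mem_cons_of_mem d hx)
      · rintro (hx | hx)
        · exact Or.inl hx
        · rcases List.mem_cons.mp hx with rfl | hx
          · exact Or.inl hd
          · exact Or.inr hx
    · rw [ih]
      simp [List.mem_append, List.mem_cons]
      tauto

theorem pvDedup_nodup (dados : List Int) : ∀ (acc : List Int), acc.Nodup → (pvDedup dados acc).Nodup := by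
  induction dados with
  | nil => intro acc h; exact h
  | cons d rest ih =>
    intro acc hacc
    simp only [pvDedup]
    split
    · exact ih acc hacc
    · rename_i hd
      refine ih (acc ++ [d]) ?_
      simp only [List.nodup_append, List.nodup_singleton, hacc, true_and]
      intro a ha b hb
      rw [List.mem_singleton] at hb
      subst hb
      exact fun had => hd (had ▸ ha)

-- ---- bridging pvScan to a structural scan ----

def pvRunScan (prev cont : Int) : List Int → Int
  | [] => 0
  | x :: xs =>
    if x = prev + 1 then (if cont + 1 ≥ 4 then 15 else pvRunScan x (cont + 1) xs)
    else pvRunScan x 1 xs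

theorem pvScan_shift (h : Int) (l : List Int) (js : List Nat) :
    ∀ (c : Int), (∀ j ∈ js, 1 ≤ j) →
    pvScan (h :: l) (js.map (· + 1)) c = pvScan l js c := by
  induction js with
  | nil => intro c _; rfl
  | cons j js ih =>
    intro c hge
    obtain ⟨k, rfl⟩ : ∃ k, j = k + 1 := by
      have := hge j (List.mem_cons_self ..); exact ⟨j - 1, by omega⟩
    simp only [List.map_cons, pvScan, Nat.add_sub_cancel, List.getD_cons_succ]
    split <;> [skip; exact ih 1 fun j hj => hge j (List.mem_cons_of_mem _ hj)]
    split
    · rfl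
    · exact ih (c+1) fun j hj => hge j (List.mem_cons_of_mem _ hj)

theorem pvScan_bridge (ts : List Int) : ∀ (h c : Int),
    pvScan (h :: ts) (List.range' 1 ts.length) c = pvRunScan h c ts := by
  induction ts with
  | nil => intro h c; rfl
  | cons t ts ih =>
    intro h c
    rw [List.length_cons, List.range'_succ]
    have hshift : ∀ c' : Int, pvScan (h :: t :: ts) (List.range' 2 ts.length) c'
        = pvScan (t :: ts) (List.range' 1 ts.length) c' := by
      intro c'
      rw [pvRange'_shift 1]
      exact pvScan_shift h (t :: ts) (List.range' 1 ts.length) c'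
        (fun j hj => (List.mem_range'_1.mp hj).1)
    simp only [pvScan, pvRunScan, Nat.sub_self, List.getD_cons_succ, List.getD_cons_zero]
    split
    · split
      · rfl
      · rw [hshift, ih]
    · rw [hshift, ih]

-- ---- semantics of the scan on a strictly sorted list ----

def pvQ4 (l : List Int) : Prop := ∃ v, v ∈ l ∧ v + 1 ∈ l ∧ v + 2 ∈ l ∧ v + 3 ∈ l

def pvCP (h : Int) (n : Nat) (ts : List Int) : Prop :=
  ((List.range n).map (fun k : Nat => h + (k : Int) + 1)) <+: ts

theorem pvMinHead (x : Int) (xs : List Int) (hs : (x :: xs).Pairwise (· < ·)) :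
    ∀ v ∈ x :: xs, x ≤ v := by
  intro v hv
  rcases List.mem_cons.mp hv with rfl | hv
  · exact le_refl v
  · exact le_of_lt ((List.pairwise_cons.mp hs).1 v hv)

theorem pvMapConsec (h : Int) (n : Nat) :
    (List.range (n+1)).map (fun k : Nat => h + (k : Int) + 1)
      = (h + 1) :: (List.range n).map (fun k : Nat => (h + 1) + (k : Int) + 1) := by
  rw [List.range_succ_eq_map, List.map_cons, List.map_map]
  refine List.cons_eq_cons.mpr ⟨by norm_num, ?_⟩
  exact List.map_congr_left (fun k _ => by simp only [Function.comp_apply]; push_cast; ring)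

theorem pvCP_cons (h t : Int) (n : Nat) (ts : List Int) (ht : t = h + 1)
    (hcp : pvCP t n ts) : pvCP h (n+1) (t :: ts) := by
  unfold pvCP at *
  rw [pvMapConsec, List.cons_prefix_cons]
  exact ⟨ht.symm, by rw [← ht]; exact hcp⟩

theorem pvCP_uncons (h x : Int) (m : Nat) (ts : List Int)
    (hcp : pvCP h (m+1) (x :: ts)) : x = h + 1 ∧ pvCP (h+1) m ts := by
  unfold pvCP at *
  rw [pvMapConsec, List.cons_prefix_cons] at hcp
  exact ⟨hcp.1.symm, hcp.2⟩

theorem pvQ4_mono (t : Int) (ts : List Int) (hq : pvQ4 ts) : pvQ4 (t :: ts) := by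
  obtain ⟨v, h0, h1, h2, h3⟩ := hq
  exact ⟨v, List.mem_cons_of_mem t h0, List.mem_cons_of_mem t h1,
    List.mem_cons_of_mem t h2, List.mem_cons_of_mem t h3⟩

theorem pvQ4_cons_elim (t : Int) (ts : List Int) (hs : (t :: ts).Pairwise (· < ·))
    (hq : pvQ4 (t :: ts)) : pvQ4 ts ∨ (t + 1 ∈ ts ∧ t + 2 ∈ ts ∧ t + 3 ∈ ts) := by
  obtain ⟨v, h0, h1, h2, h3⟩ := hq
  have hgt : ∀ x ∈ ts, t < x := (List.pairwise_cons.mp hs).1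
  have hmem : ∀ w : Int, w ∈ t :: ts → t < w → w ∈ ts := by
    intro w hw hlt
    rcases List.mem_cons.mp hw with rfl | hw
    · omega
    · exact hw
  rcases List.mem_cons.mp h0 with rfl | h0'
  · right
    exact ⟨hmem _ h1 (by omega), hmem _ h2 (by omega), hmem _ h3 (by omega)⟩
  · left
    have hv : t < v := hgt v h0'
    exact ⟨v, h0', hmem _ h1 (by omega), hmem _ h2 (by omega), hmem _ h3 (by omega)⟩

theorem pvConsecPrefix (t : Int) (ts : List Int) (hs : ts.Pairwise (· < ·))
    (hgt : ∀ x ∈ ts, t < x) (h1 : t + 1 ∈ ts) (h2 : t + 2 ∈ ts) (h3 : t + 3 ∈ ts) :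
    pvCP t 3 ts := by
  cases ts with
  | nil => simp at h1
  | cons u us =>
    have hu : u = t + 1 := by
      have h1' := pvMinHead u us hs (t+1) h1
      have h2' := hgt u (List.mem_cons_self ..)
      omega
    subst hu
    have hs' : us.Pairwise (· < ·) := (List.pairwise_cons.mp hs).2
    have hgt' : ∀ x ∈ us, t + 1 < x := (List.pairwise_cons.mp hs).1
    have h2' : t + 2 ∈ us := by
      rcases List.mem_cons.mp h2 with he | h
      · omega
      · exact h
    have h3' : t + 3 ∈ us := by
      rcases List.mem_cons.mp h3 with he | h
      · omega
      · exact h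
    cases us with
    | nil => simp at h2'
    | cons v vs =>
      have hv : v = t + 2 := by
        have hmin := pvMinHead v vs hs' (t+2) h2'
        have := hgt' v (List.mem_cons_self ..)
        omega
      subst hv
      have h3'' : t + 3 ∈ vs := by
        rcases List.mem_cons.mp h3' with he | h
        · omega
        · exact h
      cases vs with
      | nil => simp at h3''
      | cons w ws =>
        have hw : w = t + 3 := by
          have hmin := pvMinHead w ws ((List.pairwise_cons.mp hs').2) (t+3) h3''
          have := (List.pairwise_cons.mp hs').1 w (List.mem_cons_self ..)
          omega
        subst hw
        unfold pvCP
        have hmap : (List.range 3).map (fun k : Nat => t + (k : Int) + 1) = [t+1, t+2, t+3] := by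
          simp [List.range_succ]
          omega
        rw [hmap]
        exact ⟨ws, rfl⟩

theorem pvCP_mem (h : Int) (n : Nat) (ts : List Int) (hcp : pvCP h n ts) :
    ∀ k : Nat, k < n → h + (k : Int) + 1 ∈ ts := by
  intro k hk
  exact hcp.subset (List.mem_map.mpr ⟨k, List.mem_range.mpr hk, rfl⟩)

theorem pvRunScan_main (ts : List Int) : ∀ (h c : Int), 1 ≤ c → c ≤ 3 →
    (h :: ts).Pairwise (· < ·) →
    (pvRunScan h c ts = 15 ↔ (∃ n : Nat, 4 ≤ c + (n : Int) ∧ pvCP h n ts) ∨ pvQ4 ts) := by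
  induction ts with
  | nil =>
    intro h c hc1 hc3 hs
    simp only [pvRunScan]
    constructor
    · intro h15; norm_num at h15
    · rintro (⟨n, hn, hcp⟩ | ⟨v, hv, _⟩)
      · exfalso
        have hlen := hcp.length_le
        simp at hlen
        omega
      · simp at hv
  | cons t ts ih =>
    intro h c hc1 hc3 hs
    have hht : h < t := (List.pairwise_cons.mp hs).1 t (List.mem_cons_self ..)
    have hs' : (t :: ts).Pairwise (· < ·) := (List.pairwise_cons.mp hs).2
    have hgt' : ∀ x ∈ ts, t < x := (List.pairwise_cons.mp hs').1
    simp only [pvRunScan]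
    by_cases hteq : t = h + 1
    · rw [if_pos hteq]
      by_cases hc4 : c + 1 ≥ 4
      · rw [if_pos hc4]
        constructor
        · intro _
          refine Or.inl ⟨1, by push_cast; omega, ?_⟩
          unfold pvCP
          have : (List.range 1).map (fun k : Nat => h + (k : Int) + 1) = [t] := by
            simp [List.range_succ, hteq]
          rw [this]
          exact ⟨ts, rfl⟩
        · intro _; rfl
      · rw [if_neg hc4, ih t (c+1) (by omega) (by omega) hs']
        constructor
        · rintro (⟨n, hn, hcp⟩ | hq)
          · exact Or.inl ⟨n+1, by push_cast at hn ⊢; omega, pvCP_cons h t n ts hteq hcp⟩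
          · exact Or.inr (pvQ4_mono t ts hq)
        · rintro (⟨n, hn, hcp⟩ | hq)
          · cases n with
            | zero => exfalso; omega
            | succ m =>
              obtain ⟨hx, hcp'⟩ := pvCP_uncons h t m ts hcp
              refine Or.inl ⟨m, by push_cast at hn ⊢; omega, ?_⟩
              rw [hteq]; exact hcp'
          · rcases pvQ4_cons_elim t ts hs' hq with hq' | ⟨h1, h2, h3⟩
            · exact Or.inr hq'
            · exact Or.inl ⟨3, by push_cast; omega,
                pvConsecPrefix t ts ((List.pairwise_cons.mp hs').2) hgt' h1 h2 h3⟩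
    · rw [if_neg hteq, ih t 1 (by norm_num) (by norm_num) hs']
      constructor
      · rintro (⟨n, hn, hcp⟩ | hq)
        · have h3n : 3 ≤ n := by omega
          refine Or.inr ⟨t, List.mem_cons_self .., ?_, ?_, ?_⟩
          · have := pvCP_mem t n ts hcp 0 (by omega)
            push_cast at this
            exact List.mem_cons_of_mem t (by simpa using this)
          · have := pvCP_mem t n ts hcp 1 (by omega)
            push_cast at this
            exact List.mem_cons_of_mem t (by
              have h2 : t + (1:Int) + 1 = t + 2 := by ring
              rwa [h2] at this)
          · have := pvCP_mem t n ts hcp 2 (by omega)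
            push_cast at this
            exact List.mem_cons_of_mem t (by
              have h2 : t + (2:Int) + 1 = t + 3 := by ring
              rwa [h2] at this)
        · exact Or.inr (pvQ4_mono t ts hq)
      · rintro (⟨n, hn, hcp⟩ | hq)
        · cases n with
          | zero => exfalso; push_cast at hn; omega
          | succ m =>
            exact absurd (pvCP_uncons h t m ts hcp).1 hteq
        · rcases pvQ4_cons_elim t ts hs' hq with hq' | ⟨h1, h2, h3⟩
          · exact Or.inr hq'
          · exact Or.inl ⟨3, by norm_num,
              pvConsecPrefix t ts ((List.pairwise_cons.mp hs').2) hgt' h1 h2 h3⟩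

theorem pvRunScan_values (ts : List Int) : ∀ (h c : Int),
    pvRunScan h c ts = 15 ∨ pvRunScan h c ts = 0 := by
  induction ts with
  | nil => intro h c; right; rfl
  | cons t ts ih =>
    intro h c
    simp only [pvRunScan]
    split
    · split
      · left; rfl
      · exact ih t (c+1)
    · exact ih t 1

theorem pvRunScan_iff_Q4 (h : Int) (ts : List Int) (hs : (h :: ts).Pairwise (· < ·)) :
    pvRunScan h 1 ts = 15 ↔ pvQ4 (h :: ts) := by
  rw [pvRunScan_main ts h 1 (by norm_num) (by norm_num) hs]
  have hgt : ∀ x ∈ ts, h < x := (List.pairwise_cons.mp hs).1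
  constructor
  · rintro (⟨n, hn, hcp⟩ | hq)
    · have h3n : 3 ≤ n := by omega
      refine ⟨h, List.mem_cons_self .., ?_, ?_, ?_⟩
      · have := pvCP_mem h n ts hcp 0 (by omega)
        push_cast at this
        exact List.mem_cons_of_mem h (by simpa using this)
      · have := pvCP_mem h n ts hcp 1 (by omega)
        push_cast at this
        exact List.mem_cons_of_mem h (by
          have h2 : h + (1:Int) + 1 = h + 2 := by ring
          rwa [h2] at this)
      · have := pvCP_mem h n ts hcp 2 (by omega)
        push_cast at this
        exact List.mem_cons_of_mem h (by
          have h2 : h + (2:Int) + 1 = h + 3 := by ring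
          rwa [h2] at this)
    · exact pvQ4_mono h ts hq
  · intro hq
    rcases pvQ4_cons_elim h ts hs hq with hq' | ⟨h1, h2, h3⟩
    · exact Or.inr hq'
    · exact Or.inl ⟨3, by norm_num,
        pvConsecPrefix h ts ((List.pairwise_cons.mp hs).2) hgt h1 h2 h3⟩

theorem pvQ4_congr (l l' : List Int) (hmem : ∀ x : Int, x ∈ l ↔ x ∈ l') :
    pvQ4 l ↔ pvQ4 l' := by
  unfold pvQ4
  constructor <;> rintro ⟨v, h0, h1, h2, h3⟩
  · exact ⟨v, (hmem v).mp h0, (hmem _).mp h1, (hmem _).mp h2, (hmem _).mp h3⟩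
  · exact ⟨v, (hmem v).mpr h0, (hmem _).mpr h1, (hmem _).mpr h2, (hmem _).mpr h3⟩

theorem pvSortedList_pairwise (dados : List Int) :
    (pvSelSort (pvDedup dados [])).Pairwise (· < ·) := by
  have hnodup : (pvSelSort (pvDedup dados [])).Nodup :=
    ((pvSelSort_perm _).nodup_iff).mpr (pvDedup_nodup dados [] List.nodup_nil)
  have hle := pvSelSort_sorted (pvDedup dados [])
  exact hle.imp₂ (fun a b hab hne => lt_of_le_of_ne hab hne) hnodup

theorem pvSortedList_mem (dados : List Int) (x : Int) :
    x ∈ pvSelSort (pvDedup dados []) ↔ x ∈ dados := by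
  rw [(pvSelSort_perm _).mem_iff, pvDedup_mem]
  simp

theorem pvA_eq_scan (dados : List Int) :
    calcula_pontos_sequencia_baixa dados
      = pvScan (pvSelSort (pvDedup dados []))
          (List.range' 1 ((pvSelSort (pvDedup dados [])).length - 1)) 1 := by
  simp only [calcula_pontos_sequencia_baixa, pvSortPass_eq_selSort]

-- ---- putting it together ----

theorem pvA_eq_15_iff (dados : List Int) :
    calcula_pontos_sequencia_baixa dados = 15 ↔ pvQ4 dados := by
  rw [pvA_eq_scan]
  have hpw := pvSortedList_pairwise dados
  have hmem := pvSortedList_mem dados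
  cases hsel : pvSelSort (pvDedup dados []) with
  | nil =>
    rw [hsel] at hmem
    simp only [List.length_nil]
    constructor
    · intro h15; norm_num [pvScan] at h15
    · rintro ⟨v, hv, -⟩
      exact absurd ((hmem v).mpr hv) (by simp)
  | cons hd tl =>
    rw [hsel] at hpw hmem
    simp only [List.length_cons, Nat.add_sub_cancel]
    rw [pvScan_bridge, pvRunScan_iff_Q4 hd tl hpw]
    exact pvQ4_congr _ _ hmem

theorem pvA_values (dados : List Int) :
    calcula_pontos_sequencia_baixa dados = 15 ∨ calcula_pontos_sequencia_baixa dados = 0 := by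
  rw [pvA_eq_scan]
  cases hsel : pvSelSort (pvDedup dados []) with
  | nil => right; rfl
  | cons hd tl =>
    simp only [List.length_cons, Nat.add_sub_cancel]
    rw [pvScan_bridge]
    exact pvRunScan_values tl hd 1

theorem pvB_values (dados : List Int) :
    calcula_pontos_sequencia_baixa_alt dados = 15 ∨ calcula_pontos_sequencia_baixa_alt dados = 0 := by
  unfold calcula_pontos_sequencia_baixa_alt
  dsimp only
  split
  · left; rfl
  · right; rfl

theorem pvB_eq_15_iff (dados : List Int) :
    calcula_pontos_sequencia_baixa_alt dados = 15 ↔ pvQ4 dados := by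
  unfold calcula_pontos_sequencia_baixa_alt
  dsimp only
  have hq : (PySem.Set.ofList dados).any (fun v =>
      PySem.Set.contains (PySem.Set.ofList dados) (v+1) &&
      PySem.Set.contains (PySem.Set.ofList dados) (v+2) &&
      PySem.Set.contains (PySem.Set.ofList dados) (v+3)) = true ↔ pvQ4 dados := by
    rw [List.any_eq_true]
    constructor
    · rintro ⟨v, hv, hb⟩
      simp only [Bool.and_eq_true, PySem.Set.contains_iff, PySem.Set.mem_ofList] at hb
      exact ⟨v, (PySem.Set.mem_ofList _ _).mp hv, hb.1.1, hb.1.2, hb.2⟩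
    · rintro ⟨v, h0, h1, h2, h3⟩
      refine ⟨v, (PySem.Set.mem_ofList _ _).mpr h0, ?_⟩
      simp only [Bool.and_eq_true, PySem.Set.contains_iff, PySem.Set.mem_ofList]
      exact ⟨⟨h1, h2⟩, h3⟩
  split
  · rename_i hcond
    constructor
    · intro _; exact hq.mp hcond
    · intro _; rfl
  · rename_i hcond
    constructor
    · intro h0; norm_num at h0
    · intro hqq; exact absurd (hq.mpr hqq) hcond

-- ===== VERDICT (by name: the statement is the Claim_ definition above) =====
theorem calcula_pontos_sequencia_baixa_spec : Claim_equal_calcula_pontos_sequencia_baixa := by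
  intro dados _
  unfold Spec_calcula_pontos_sequencia_baixa
  by_cases hQ : pvQ4 dados
  · rw [(pvA_eq_15_iff dados).mpr hQ, (pvB_eq_15_iff dados).mpr hQ]
  · have hA : calcula_pontos_sequencia_baixa dados = 0 := by
      rcases pvA_values dados with h | h
      · exact absurd ((pvA_eq_15_iff dados).mp h) hQ
      · exact h
    have hB : calcula_pontos_sequencia_baixa_alt dados = 0 := by
      rcases pvB_values dados with h | h
      · exact absurd ((pvB_eq_15_iff dados).mp h) hQ
      · exact h
    rw [hA, hB]
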